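-- pv_equiv track=rewrite | github.com/flatsurf/veerer | veerer/permutation.py | perms_are_transitive
-- ===== SOURCE A (Python) =====
-- def perms_are_transitive(p, n=None):
--     """
--     Test whether the group generated by the permutations in ``p`` is transitive.
--
--     We assume that the list of partial permutations act on
--     the same domain (ie the -1 occur at the same positions).
--
--     INPUT:
--
--     - ``p`` - a list of permutations of `[0, n-1]`
--
--     EXAMPLES::
--
--         sage: from veerer.permutation import perms_are_transitive
--         sage: perms_are_transitive([[0,1,2],[0,2,1]])
--         False
--         sage: perms_are_transitive([[0,1,2],[1,2,0]])
--         True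
--
--         sage: p0 = [0,2,3,1,7,5,6,4]
--         sage: p1 = [7,1,2,3,4,5,6,0]
--         sage: p2 = [6,1,2,3,4,5,0,7]
--         sage: p3 = [1,0,2,3,4,5,6,7]
--         sage: p4 = [0,1,4,5,2,3,6,7]
--         sage: perms_are_transitive([p0,p1,p2,p3,p4])
--         True
--         sage: perms_are_transitive([p0,p1,p2,p3])
--         False
--     """
--     if not p:
--         raise ValueError("empty list")
--
--     p0 = p[0]
--     if n is None:
--         n = len(p0)
--
--     # compute the connected component of 0
--     cc0 = [True if j == -1 else False for j in p0]
--     todo = [0]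
--     cc0[0] = True
--     while todo:
--         j = todo.pop()
--         for pp in p:
--             k = pp[j]
--             if cc0[k] is False:
--                 todo.append(k)
--                 cc0[k] = True
--
--     return all(cc0)
-- ===== SOURCE B (Python) =====
-- def perms_are_transitive(p, n=None):
--     """Round-based fixpoint instead of a worklist: positions carrying -1 in
--     p[0] count as done from the start, and every sweep marks the images of
--     all reached active positions under every permutation, until a full sweep
--     changes nothing; transitive iff every position ends up marked."""
--     if not p:
--         raise ValueError("empty list")
--     p0 = p[0]
--     m = len(p0)
--     seen = [v == -1 for v in p0]
--     seen[0] = True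
--     changed = True
--     while changed:
--         changed = False
--         for j in range(m):
--             if seen[j] and p0[j] != -1:
--                 for pp in p:
--                     k = pp[j]
--                     if not seen[k]:
--                         seen[k] = True
--                         changed = True
--     return all(seen)
-- ===== Notes on version B (the rewrite author's own statement) =====
-- stated objective: alternative
-- what changed: Replaces A's worklist search (pop a position from a todo stack, scan all permutations, flag and push unseen images) by a round-based fixpoint: full sweeps over all positions that mark the images of every already reached active position under every permutation, repeated until a sweep changes nothing; …
-- outside the precondition, e.g. on perms_are_transitive([[-1, -2]], None): A returns True, B returns False; on perms_are_transitive([[-2, 1], [-1]], None): A returns True, B raises IndexError; on perms_are_transitive([[0, 1], [0]], None): A returns False, B returns False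
import Mathlib
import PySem

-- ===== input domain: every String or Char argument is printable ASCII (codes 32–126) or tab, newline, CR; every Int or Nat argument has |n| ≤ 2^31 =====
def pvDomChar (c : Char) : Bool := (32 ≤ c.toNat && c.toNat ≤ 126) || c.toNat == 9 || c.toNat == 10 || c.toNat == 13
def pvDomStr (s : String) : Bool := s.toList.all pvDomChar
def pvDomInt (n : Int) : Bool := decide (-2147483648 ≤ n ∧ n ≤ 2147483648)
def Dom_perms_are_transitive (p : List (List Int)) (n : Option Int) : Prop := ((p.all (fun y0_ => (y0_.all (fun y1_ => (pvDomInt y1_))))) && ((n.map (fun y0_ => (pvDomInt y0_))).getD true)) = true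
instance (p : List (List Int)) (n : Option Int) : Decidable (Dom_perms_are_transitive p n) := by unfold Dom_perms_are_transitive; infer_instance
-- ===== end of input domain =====

-- B replaces A's worklist search (todo stack of positions) by a round-based
-- fixpoint: full sweeps marking the images of all reached active positions under
-- every permutation, repeated until a sweep changes nothing; objective:
-- alternative (no stack, different traversal; worst case an extra factor m).

-- ===== PORT A =====
-- one body of A's inner 'for pp in p' loop: k = pp[j]; if cc0[k] is False: todo.append(k); cc0[k] = True
def pvAStep (j : Int) (st : List Bool × List Int) (pp : List Int) : List Bool × List Int :=
  let k := (PySem.List.pyGet? pp j).getD 0   -- pp[j]; none = IndexError, excluded by Pre_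
  if PySem.List.pyGet? st.1 k = some false then
    (PySem.List.pySetD st.1 k true, st.2 ++ [k])
  else st

-- setting a False entry to True removes exactly one False
lemma pvCountSetTrue (l : List Bool) (i : Nat) (h : l[i]? = some false) :
    (l.set i true).count false + 1 = l.count false := by
  induction l generalizing i with
  | nil => simp at h
  | cons b t ih =>
    cases i with
    | zero =>
      simp only [List.getElem?_cons_zero, Option.some.injEq] at h
      subst h
      simp
    | succ i =>
      simp only [List.getElem?_cons_succ] at h
      simp only [List.set_cons_succ, List.count_cons]
      have := ih i h
      omega

-- each taken if-branch flips one False of cc0 to True while appending one element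
lemma pvAStep_mu_le (j : Int) (st : List Bool × List Int) (pp : List Int) :
    2 * (pvAStep j st pp).1.count false + (pvAStep j st pp).2.length
      ≤ 2 * st.1.count false + st.2.length := by
  unfold pvAStep
  dsimp only
  set k := (PySem.List.pyGet? pp j).getD 0 with hk
  split_ifs with hc
  · rw [show PySem.List.pyGet? st.1 k
        = (PySem.List.pyIdx? st.1.length k).bind (fun i => st.1[i]?) from rfl] at hc
    rcases hi : PySem.List.pyIdx? st.1.length k with _ | idx
    · rw [hi] at hc; simp at hc
    · rw [hi] at hc; simp only [Option.bind_some] at hc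
      have hset : PySem.List.pySetD st.1 k true = st.1.set idx true := by
        simp [PySem.List.pySetD, PySem.List.pySet?, hi]
      have := pvCountSetTrue st.1 idx hc
      simp only [hset, List.length_append, List.length_cons, List.length_nil]
      omega
  · exact le_refl _

lemma pvAStep_foldl_mu_le (j : Int) (l : List (List Int)) (st : List Bool × List Int) :
    2 * (l.foldl (pvAStep j) st).1.count false + (l.foldl (pvAStep j) st).2.length
      ≤ 2 * st.1.count false + st.2.length := by
  induction l generalizing st with
  | nil => exact le_refl _
  | cons pp l ih => exact le_trans (ih _) (pvAStep_mu_le j st pp)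

-- the 'while todo:' loop: j = todo.pop() (last element), then the inner for-loop
def pvALoop (p : List (List Int)) (cc0 : List Bool) (todo : List Int) : List Bool :=
  if todo.isEmpty then cc0
  else
    let j := todo.getLastD 0          -- j = todo.pop(): last element …
    let st := p.foldl (pvAStep j) (cc0, todo.dropLast)   -- … removed, then the inner for-loop
    pvALoop p st.1 st.2
termination_by 2 * cc0.count false + todo.length
decreasing_by
  rename_i hne
  simp only [List.foldl_attach]
  have hb := pvAStep_foldl_mu_le (todo.getLastD 0) p (cc0, todo.dropLast)
  have hlen : todo.length ≠ 0 := by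
    simpa [List.isEmpty_iff, List.length_eq_zero_iff] using hne
  have hdl : todo.dropLast.length = todo.length - 1 := List.length_dropLast
  simp only at hb
  omega

def perms_are_transitive (p : List (List Int)) (n : Option Int) : Bool :=
  match p with
  | [] => false   -- Python: raise ValueError("empty list"); excluded by Pre_
  | p0 :: rest =>
    -- 'if n is None: n = len(p0)' — n is never used afterwards, so it has no effect
    let cc0 := p0.map (fun j => j == (-1 : Int))
    let cc0 := PySem.List.pySetD cc0 0 true   -- cc0[0] = True; IndexError iff p0 == [], excluded by Pre_
    (pvALoop (p0 :: rest) cc0 [0]).all id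

-- ===== PORT B =====
-- one body of B's innermost 'for pp in p' loop: k = pp[j]; if not seen[k]: seen[k] = True; changed = True
def pvB2Step (j : Int) (st : List Bool × Bool) (pp : List Int) : List Bool × Bool :=
  let k := (PySem.List.pyGet? pp j).getD 0   -- pp[j]; none = IndexError, excluded by Pre_
  if PySem.List.pyGet? st.1 k = some false then (PySem.List.pySetD st.1 k true, true)
  else st

-- one j of a sweep: if seen[j] and p0[j] != -1: the innermost loop
def pvB2J (p0 : List Int) (p : List (List Int)) (st : List Bool × Bool) (j : Int) : List Bool × Bool :=
  if PySem.List.pyGet? st.1 j = some true ∧ (PySem.List.pyGet? p0 j).getD 0 ≠ -1 then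
    p.foldl (pvB2Step j) st
  else st

-- a flip turns one False to True and reports a change (termination only)
lemma pvB2Step_count (j : Int) (st : List Bool × Bool) (pp : List Int) :
    (pvB2Step j st pp).1.count false ≤ st.1.count false ∧
    ((pvB2Step j st pp).2 = true → st.2 = true ∨
      (pvB2Step j st pp).1.count false < st.1.count false) := by
  unfold pvB2Step
  dsimp only
  set k := (PySem.List.pyGet? pp j).getD 0 with hk
  split_ifs with hc
  · rw [show PySem.List.pyGet? st.1 k
        = (PySem.List.pyIdx? st.1.length k).bind (fun i => st.1[i]?) from rfl] at hc
    rcases hi : PySem.List.pyIdx? st.1.length k with _ | idx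
    · rw [hi] at hc; simp at hc
    · rw [hi] at hc; simp only [Option.bind_some] at hc
      have hset : PySem.List.pySetD st.1 k true = st.1.set idx true := by
        simp [PySem.List.pySetD, PySem.List.pySet?, hi]
      have := pvCountSetTrue st.1 idx hc
      simp only [hset]
      exact ⟨by omega, fun _ => Or.inr (by omega)⟩
  · exact ⟨le_refl _, fun h => Or.inl h⟩

lemma pvB2Foldl_count {α : Type} (step : List Bool × Bool → α → List Bool × Bool)
    (hstep : ∀ st a, (step st a).1.count false ≤ st.1.count false ∧
      ((step st a).2 = true → st.2 = true ∨ (step st a).1.count false < st.1.count false)) :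
    ∀ (l : List α) (st : List Bool × Bool),
      (l.foldl step st).1.count false ≤ st.1.count false ∧
      ((l.foldl step st).2 = true → st.2 = true ∨
        (l.foldl step st).1.count false < st.1.count false) := by
  intro l
  induction l with
  | nil => exact fun st => ⟨le_refl _, fun h => Or.inl h⟩
  | cons a l ih =>
    intro st
    obtain ⟨h1, h2⟩ := hstep st a
    obtain ⟨g1, g2⟩ := ih (step st a)
    refine ⟨le_trans g1 h1, ?_⟩
    intro hh
    rcases g2 hh with h | h
    · rcases h2 h with h' | h'
      · exact Or.inl h'
      · exact Or.inr (lt_of_le_of_lt g1 h')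
    · exact Or.inr (lt_of_lt_of_le h h1)

lemma pvB2J_count (p0 : List Int) (p : List (List Int)) (st : List Bool × Bool) (j : Int) :
    (pvB2J p0 p st j).1.count false ≤ st.1.count false ∧
    ((pvB2J p0 p st j).2 = true → st.2 = true ∨
      (pvB2J p0 p st j).1.count false < st.1.count false) := by
  unfold pvB2J
  split_ifs with h
  · exact pvB2Foldl_count _ (fun st pp => pvB2Step_count j st pp) p st
  · exact ⟨le_refl _, fun h => Or.inl h⟩

-- the 'while changed:' loop: one full sweep over range(m), repeated until no change
def pvB2Loop (p0 : List Int) (p : List (List Int)) (m : Int) (seen : List Bool) : List Bool :=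
  if ((PySem.List.pyRange 0 m 1).foldl (pvB2J p0 p) (seen, false)).2 then
    pvB2Loop p0 p m ((PySem.List.pyRange 0 m 1).foldl (pvB2J p0 p) (seen, false)).1
  else ((PySem.List.pyRange 0 m 1).foldl (pvB2J p0 p) (seen, false)).1
termination_by seen.count false
decreasing_by
  rename_i hch
  have h := pvB2Foldl_count (pvB2J p0 p) (pvB2J_count p0 p) (PySem.List.pyRange 0 m 1) (seen, false)
  rcases h.2 hch with h' | h'
  · simp at h'
  · simpa using h'

def perms_are_transitive_alt (p : List (List Int)) (n : Option Int) : Bool :=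
  match p with
  | [] => false   -- Python: raise ValueError("empty list"); excluded by Pre_
  | p0 :: rest =>
    -- seen = [v == -1 for v in p0]; seen[0] = True
    let seen := p0.map (fun v => v == (-1 : Int))
    let seen := PySem.List.pySetD seen 0 true
    (pvB2Loop p0 (p0 :: rest) (p0.length : Int) seen).all id

-- ===== PRECONDITION & SPEC =====
-- Pre_ excludes the empty list and the empty first row (A raises ValueError resp.
-- IndexError), requires all rows to have the first row's length m with entries in
-- [-m, m) — outside that shape A raises IndexError whenever its walk reads a
-- position beyond a row or an out-of-range entry, and whether it does depends on
-- which positions the walk visits — and requires the start position 0 to be active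
-- (p[0][0] != -1): when 0 itself is inactivated, A's value comes from walking
-- through cc0[-1]/pp[-1] by Python's negative-index wraparound, an accident of the
-- implementation.
def Pre_perms_are_transitive (p : List (List Int)) (n : Option Int) : Prop :=
  p ≠ [] ∧ 1 ≤ (p.headD []).length ∧ (p.headD [])[0]? ≠ some (-1) ∧
  ∀ q ∈ p, q.length = (p.headD []).length ∧
    ∀ e ∈ q, -((p.headD []).length : Int) ≤ e ∧ e < ((p.headD []).length : Int)
instance (p : List (List Int)) (n : Option Int) : Decidable (Pre_perms_are_transitive p n) := by
  unfold Pre_perms_are_transitive; infer_instance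

def pvWitness_perms_are_transitive : List (List Int) × Option Int := ([[0, 2, 1], [1, 2, 0]], none)

def Spec_perms_are_transitive (p : List (List Int)) (n : Option Int) (out : Bool) : Prop := out = perms_are_transitive_alt p n
instance (p : List (List Int)) (n : Option Int) (out : Bool) : Decidable (Spec_perms_are_transitive p n out) := by unfold Spec_perms_are_transitive; infer_instance

-- ===== CLAIM (what is proved, stated in full; the proofs are below) =====
def Claim_equal_perms_are_transitive : Prop := ∀ (p : List (List Int)) (n : Option Int), Dom_perms_are_transitive p n → Pre_perms_are_transitive p n → Spec_perms_are_transitive p n (perms_are_transitive p n)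

-- ===== LEMMAS AND PROOFS =====

-- the value pp[j] both programs read (total form; exact under Pre_)
def pvVal (pp : List Int) (j : Int) : Int := (PySem.List.pyGet? pp j).getD 0

-- position i is inactive (pre-marked by a -1 entry of p[0])
def pvPm (p0 : List Int) (i : Nat) : Prop := p0[i]? = some (-1)

-- one step of the walk: from an expandable position a (0, or an active position)
-- to the canonical position of pp[a]
def pvEdgeE (p0 : List Int) (p : List (List Int)) (m : Nat) (a b : Int) : Prop :=
  (a = 0 ∨ ¬ pvPm p0 a.toNat) ∧ ∃ pp ∈ p, b = (pvVal pp a).emod (m : Int)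

def pvReachE (p0 : List Int) (p : List (List Int)) (m : Nat) (x : Int) : Prop :=
  Relation.ReflTransGen (pvEdgeE p0 p m) 0 x

lemma pvEmod_lo (a : Int) (b : Int) (h1 : -b ≤ a) (h2 : a < 0) :
    a.emod b = a + b := by
  show a % b = a + b
  have h3 : (a + b * 1) % b = a % b := Int.add_mul_emod_self_left a b 1
  rw [mul_one] at h3
  rw [← h3]
  exact Int.emod_eq_of_lt (by omega) (by omega)

lemma pvEmod_id (a : Int) (b : Int) (h1 : 0 ≤ a) (h2 : a < b) : a.emod b = a :=
  Int.emod_eq_of_lt h1 h2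

lemma pvEmod_bounds (a : Int) (b : Int) (hb : 0 < b) : 0 ≤ a.emod b ∧ a.emod b < b :=
  ⟨Int.emod_nonneg a (by omega), Int.emod_lt_of_pos a hb⟩

lemma pvIdx_canon (L : Nat) (k : Int) (h1 : -(L : Int) ≤ k) (h2 : k < (L : Int)) :
    PySem.List.pyIdx? L k = some (k.emod L).toNat := by
  unfold PySem.List.pyIdx?
  by_cases h : 0 ≤ k
  · rw [if_pos h, if_pos h2, pvEmod_id k L h h2]
  · rw [if_neg h, if_pos (by omega)]
    rw [pvEmod_lo k L h1 (by omega)]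
    congr 1
    omega

lemma pvGet_canon {pp : List Int} {m : Nat} (hlen : pp.length = m) {k : Int}
    (h1 : -(m : Int) ≤ k) (h2 : k < (m : Int)) :
    PySem.List.pyGet? pp k = pp[(k.emod m).toNat]? := by
  show (PySem.List.pyIdx? pp.length k).bind (fun i => pp[i]?) = _
  rw [hlen, pvIdx_canon m k h1 h2]
  rfl

lemma pvVal_eq_canon {pp : List Int} {m : Nat} (hlen : pp.length = m) (hm : 0 < m) {k : Int}
    (h1 : -(m : Int) ≤ k) (h2 : k < (m : Int)) :
    pvVal pp k = pvVal pp (k.emod m) := by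
  obtain ⟨hc0, hcm⟩ := pvEmod_bounds k m (by exact_mod_cast hm)
  unfold pvVal
  rw [pvGet_canon hlen h1 h2, pvGet_canon hlen (by omega) hcm,
    pvEmod_id _ _ hc0 hcm]

lemma pvReachE_bound {p0 : List Int} {p : List (List Int)} {m : Nat} (hm : 1 ≤ m) {x : Int}
    (hx : pvReachE p0 p m x) : 0 ≤ x ∧ x < (m : Int) := by
  induction hx with
  | refl => exact ⟨le_refl 0, by exact_mod_cast hm⟩
  | tail hab e ih =>
    obtain ⟨-, pp, hpp, rfl⟩ := e
    exact pvEmod_bounds _ _ (by exact_mod_cast hm)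

-- one pvAStep: what it does to the visited list and the stack
lemma pvAStep_spec {m : Nat} (hm : 0 < m) (j : Int) (pp : List Int) (st : List Bool × List Int)
    (hlen : st.1.length = m) (hk1 : -(m : Int) ≤ pvVal pp j) (hk2 : pvVal pp j < (m : Int)) :
    (pvAStep j st pp).1.length = m ∧
    (∀ i : Nat, st.1[i]? = some true → (pvAStep j st pp).1[i]? = some true) ∧
    (∀ x ∈ st.2, x ∈ (pvAStep j st pp).2) ∧
    (∀ i : Nat, (pvAStep j st pp).1[i]? = some true →
        st.1[i]? = some true ∨
          ((i : Int) = (pvVal pp j).emod m ∧ pvVal pp j ∈ (pvAStep j st pp).2)) ∧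
    (∀ x ∈ (pvAStep j st pp).2, x ∈ st.2 ∨
        (x = pvVal pp j ∧ st.1[((pvVal pp j).emod m).toNat]? = some false)) ∧
    (pvAStep j st pp).1[((pvVal pp j).emod m).toNat]? = some true := by
  obtain ⟨hc0, hcm⟩ := pvEmod_bounds (pvVal pp j) m (by exact_mod_cast hm)
  have hkn : ((pvVal pp j).emod m).toNat < st.1.length := by omega
  have hidx : PySem.List.pyIdx? st.1.length (pvVal pp j)
      = some ((pvVal pp j).emod m).toNat := by
    rw [hlen]
    exact pvIdx_canon m _ hk1 hk2
  have hget : PySem.List.pyGet? st.1 (pvVal pp j)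
      = some st.1[((pvVal pp j).emod m).toNat] := by
    show (PySem.List.pyIdx? st.1.length (pvVal pp j)).bind (fun i => st.1[i]?) = _
    rw [hidx]
    simp [List.getElem?_eq_getElem hkn]
  have hkk : pvAStep j st pp
      = if PySem.List.pyGet? st.1 (pvVal pp j) = some false
        then (PySem.List.pySetD st.1 (pvVal pp j) true, st.2 ++ [pvVal pp j]) else st := rfl
  by_cases hb : st.1[((pvVal pp j).emod m).toNat] = false
  · have hcond : PySem.List.pyGet? st.1 (pvVal pp j) = some false := by rw [hget, hb]
    have hset : PySem.List.pySetD st.1 (pvVal pp j) true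
        = st.1.set ((pvVal pp j).emod m).toNat true := by
      simp [PySem.List.pySetD, PySem.List.pySet?, hidx]
    have hwasfalse : st.1[((pvVal pp j).emod m).toNat]? = some false := by
      rw [List.getElem?_eq_getElem hkn, hb]
    rw [hkk, if_pos hcond, hset]
    refine ⟨by simp [hlen], ?_, ?_, ?_, ?_, ?_⟩
    · intro i hi
      rw [List.getElem?_set]
      split_ifs with h
      · simp
      · exact hi
    · intro x hx; simp [hx]
    · intro i hi
      rw [List.getElem?_set] at hi
      split_ifs at hi with h
      · exact Or.inr ⟨by rw [← h]; omega, by simp⟩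
      · exact Or.inl hi
    · intro x hx
      rcases List.mem_append.1 hx with h | h
      · exact Or.inl h
      · simp at h
        exact Or.inr ⟨h, hwasfalse⟩
    · rw [List.getElem?_set]
      simp [hkn]
  · have hb' : st.1[((pvVal pp j).emod m).toNat] = true := by
      cases h : st.1[((pvVal pp j).emod m).toNat] <;> simp_all
    have hcond : ¬ (PySem.List.pyGet? st.1 (pvVal pp j) = some false) := by
      rw [hget, hb']; simp
    rw [hkk, if_neg hcond]
    exact ⟨hlen, fun i hi => hi, fun x hx => hx, fun i hi => Or.inl hi,
      fun x hx => Or.inl hx, by rw [List.getElem?_eq_getElem hkn, hb']⟩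

-- the inner 'for pp in p' loop, folded over any sublist l of p
lemma pvAStep_foldl_spec {p : List (List Int)} {m : Nat} (hm : 1 ≤ m) {j : Int}
    (hjv : ∀ pp ∈ p, -(m : Int) ≤ pvVal pp j ∧ pvVal pp j < (m : Int)) :
    ∀ (l : List (List Int)), (∀ pp ∈ l, pp ∈ p) → ∀ (st : List Bool × List Int),
    st.1.length = m →
    (l.foldl (pvAStep j) st).1.length = m ∧
    (∀ i : Nat, st.1[i]? = some true → (l.foldl (pvAStep j) st).1[i]? = some true) ∧
    (∀ x ∈ st.2, x ∈ (l.foldl (pvAStep j) st).2) ∧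
    (∀ i : Nat, (l.foldl (pvAStep j) st).1[i]? = some true →
        st.1[i]? = some true ∨
          ((∃ pp ∈ l, (i : Int) = (pvVal pp j).emod m) ∧
            ∃ k ∈ (l.foldl (pvAStep j) st).2, k.emod m = (i : Int))) ∧
    (∀ x ∈ (l.foldl (pvAStep j) st).2, x ∈ st.2 ∨
        ((∃ pp ∈ l, x = pvVal pp j) ∧ st.1[(x.emod m).toNat]? = some false)) ∧
    (∀ pp ∈ l, (l.foldl (pvAStep j) st).1[((pvVal pp j).emod m).toNat]? = some true) := by
  intro l
  induction l with
  | nil =>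
    intro _ st hlen
    exact ⟨hlen, fun i hi => hi, fun x hx => hx, fun i hi => Or.inl hi,
      fun x hx => Or.inl hx, by simp⟩
  | cons pp l ih =>
    intro hl st hlen
    have hm' : 0 < m := hm
    have hmi : (0 : Int) < (m : Int) := by exact_mod_cast hm'
    have hpp : pp ∈ p := hl pp (by simp)
    obtain ⟨hk1, hk2⟩ := hjv pp hpp
    obtain ⟨S1, S2, S3, S4, S5, S6⟩ := pvAStep_spec hm' j pp st hlen hk1 hk2
    have hl' : ∀ q ∈ l, q ∈ p := fun q hq => hl q (by simp [hq])
    obtain ⟨F1, F2, F3, F4, F5, F6⟩ := ih hl' (pvAStep j st pp) S1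
    simp only [List.foldl_cons]
    refine ⟨F1, fun i hi => F2 i (S2 i hi), fun x hx => F3 x (S3 x hx), ?_, ?_, ?_⟩
    · -- F4: where new trues come from, and that they are represented on the stack
      intro i hi
      rcases F4 i hi with h | ⟨⟨q, hq, hiq⟩, k, hk, hkc⟩
      · rcases S4 i h with h' | ⟨hiq, hmem⟩
        · exact Or.inl h'
        · refine Or.inr ⟨⟨pp, by simp, hiq⟩, pvVal pp j, F3 _ hmem, ?_⟩
          rw [← hiq]
      · exact Or.inr ⟨⟨q, by simp [hq], hiq⟩, k, hk, hkc⟩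
    · -- F5: where new stack entries come from, and that their cell was still False
      intro x hx
      rcases F5 x hx with h | ⟨⟨q, hq, hxq⟩, hfalse⟩
      · rcases S5 x h with h' | ⟨hxq, hfalse⟩
        · exact Or.inl h'
        · exact Or.inr ⟨⟨pp, by simp, hxq⟩, by rw [hxq]; exact hfalse⟩
      · -- the cell was False after pvAStep, hence also False before (trues only grow)
        refine Or.inr ⟨⟨q, by simp [hq], hxq⟩, ?_⟩
        have hqp : q ∈ p := hl' q hq
        obtain ⟨hx1, hx2⟩ := hjv q hqp
        rw [← hxq] at hx1 hx2
        obtain ⟨hc0, hcm⟩ := pvEmod_bounds x m hmi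
        have hcn : (x.emod m).toNat < st.1.length := by omega
        rcases h : st.1[(x.emod m).toNat] with _ | _
        · rw [List.getElem?_eq_getElem hcn, h]
        · exfalso
          have := S2 (x.emod m).toNat (by rw [List.getElem?_eq_getElem hcn, h])
          rw [this] at hfalse
          simp at hfalse
    · intro q hq
      rcases List.mem_cons.1 hq with rfl | hq'
      · exact F2 _ S6
      · exact F6 q hq'

-- loop invariant of A's 'while todo:' loop
def pvInv (p0 : List Int) (p : List (List Int)) (m : Nat)
    (cc0 : List Bool) (todo : List Int) : Prop :=
  cc0.length = m ∧
  cc0[0]? = some true ∧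
  (∀ i : Nat, i < m → pvPm p0 i → cc0[i]? = some true) ∧
  (∀ i : Nat, i < m → cc0[i]? = some true → pvPm p0 i ∨ pvReachE p0 p m (i : Int)) ∧
  (∀ k ∈ todo, -(m : Int) ≤ k ∧ k < (m : Int) ∧ cc0[(k.emod m).toNat]? = some true ∧
      pvReachE p0 p m (k.emod m) ∧ (k.emod m = 0 ∨ ¬ pvPm p0 (k.emod m).toNat)) ∧
  (∀ i : Nat, i < m → cc0[i]? = some true → (i = 0 ∨ ¬ pvPm p0 i) →
      (∃ k ∈ todo, k.emod m = (i : Int)) ∨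
      ∀ pp ∈ p, cc0[((pvVal pp (i : Int)).emod m).toNat]? = some true)

lemma pvComplete {p0 : List Int} {p : List (List Int)} {m : Nat} {cc0 : List Bool}
    (hm : 1 ≤ m) (h0 : cc0[0]? = some true)
    (hcl : ∀ i : Nat, i < m → cc0[i]? = some true → (i = 0 ∨ ¬ pvPm p0 i) →
        ∀ pp ∈ p, cc0[((pvVal pp (i : Int)).emod m).toNat]? = some true) :
    ∀ x : Int, pvReachE p0 p m x → cc0[x.toNat]? = some true := by
  intro x hx
  induction hx with
  | refl => simpa using h0
  | @tail b c hab e ih =>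
    obtain ⟨hexp, pp, hpp, rfl⟩ := e
    obtain ⟨hb0, hbm⟩ := pvReachE_bound hm hab
    have hbn : b.toNat < m := by omega
    have hexp' : b.toNat = 0 ∨ ¬ pvPm p0 b.toNat := by
      rcases hexp with h | h
      · left; omega
      · exact Or.inr h
    have := hcl b.toNat hbn ih hexp' pp hpp
    rwa [Int.toNat_of_nonneg hb0] at this

lemma pvALoop_nil_spec {p0 : List Int} {p : List (List Int)} {m : Nat} {cc0 : List Bool}
    (hm : 1 ≤ m) (hinv : pvInv p0 p m cc0 []) :
    (pvALoop p cc0 []).length = m ∧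
    ∀ i : Nat, i < m →
      ((pvALoop p cc0 [])[i]? = some true ↔ (pvPm p0 i ∨ pvReachE p0 p m (i : Int))) := by
  obtain ⟨hlen, h0, hpm, hsound, -, hcl⟩ := hinv
  have heq : pvALoop p cc0 [] = cc0 := by rw [pvALoop]; simp
  rw [heq]
  refine ⟨hlen, fun i hi => ⟨fun ht => hsound i hi ht, fun hr => ?_⟩⟩
  rcases hr with hr | hr
  · exact hpm i hi hr
  · have hcl' : ∀ i : Nat, i < m → cc0[i]? = some true → (i = 0 ∨ ¬ pvPm p0 i) →
        ∀ pp ∈ p, cc0[((pvVal pp (i : Int)).emod m).toNat]? = some true := by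
      intro i hi ht hexp
      rcases hcl i hi ht hexp with h | h
      · simp at h
      · exact h
    have := pvComplete hm h0 hcl' (i : Int) hr
    simpa using this

lemma pvALoop_spec {p0 : List Int} {p : List (List Int)} {m : Nat} (hm : 1 ≤ m)
    (hlen : ∀ q ∈ p, q.length = m)
    (hactv : ∀ x : Int, -(m : Int) ≤ x → x < (m : Int) →
        ∀ pp ∈ p, -(m : Int) ≤ pvVal pp x ∧ pvVal pp x < (m : Int)) :
    ∀ (N : Nat) (cc0 : List Bool) (todo : List Int),
    2 * cc0.count false + todo.length ≤ N →
    pvInv p0 p m cc0 todo →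
    (pvALoop p cc0 todo).length = m ∧
    ∀ i : Nat, i < m →
      ((pvALoop p cc0 todo)[i]? = some true ↔ (pvPm p0 i ∨ pvReachE p0 p m (i : Int))) := by
  intro N
  induction N with
  | zero =>
    intro cc0 todo hN hinv
    have : todo = [] := by
      cases todo with
      | nil => rfl
      | cons a t =>
        exfalso
        simp only [List.length_cons] at hN
        omega
    subst this
    exact pvALoop_nil_spec hm hinv
  | succ N ih =>
    intro cc0 todo hN hinv
    rcases List.eq_nil_or_concat' todo with rfl | ⟨ys, y, rfl⟩
    · exact pvALoop_nil_spec hm hinv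
    · obtain ⟨hlc, h0, hpm, hsound, htodo, hcl⟩ := hinv
      have hmi : (0 : Int) < (m : Int) := by exact_mod_cast hm
      obtain ⟨hy1, hy2, hyt, hyreach, hyexp⟩ := htodo y (by simp)
      obtain ⟨hcy0, hcym⟩ := pvEmod_bounds y m hmi
      have hjv : ∀ pp ∈ p, -(m : Int) ≤ pvVal pp y ∧ pvVal pp y < (m : Int) :=
        fun pp hpp => hactv y hy1 hy2 pp hpp
      have heq : pvALoop p cc0 (ys ++ [y])
          = pvALoop p ((p.foldl (pvAStep y) (cc0, ys)).1) ((p.foldl (pvAStep y) (cc0, ys)).2) := by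
        rw [pvALoop]
        simp
      obtain ⟨F1, F2, F3, F4, F5, F6⟩ :=
        pvAStep_foldl_spec hm hjv p (fun q hq => hq) (cc0, ys) hlc
      -- the canonical position of y, as seen by the edge relation
      have hedge : ∀ pp ∈ p, pvEdgeE p0 p m (y.emod m) ((pvVal pp y).emod m) := by
        intro pp hpp
        refine ⟨?_, pp, hpp, ?_⟩
        · rcases hyexp with h | h
          · left; exact h
          · exact Or.inr h
        · rw [pvVal_eq_canon (hlen pp hpp) hm hy1 hy2]
      have hreach_next : ∀ pp ∈ p, pvReachE p0 p m ((pvVal pp y).emod m) := by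
        intro pp hpp
        exact Relation.ReflTransGen.tail hyreach (hedge pp hpp)
      have hinv' : pvInv p0 p m (p.foldl (pvAStep y) (cc0, ys)).1
          (p.foldl (pvAStep y) (cc0, ys)).2 := by
        refine ⟨F1, F2 0 h0, fun i hi hp => F2 i (hpm i hi hp), ?_, ?_, ?_⟩
        · -- sound
          intro i hi ht
          rcases F4 i ht with h | ⟨⟨pp, hpp, hiq⟩, -⟩
          · exact hsound i hi h
          · right
            rw [hiq]
            exact hreach_next pp hpp
        · -- todoOK
          intro x hx
          rcases F5 x hx with h | ⟨⟨pp, hpp, rfl⟩, hfalse⟩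
          · obtain ⟨hx1, hx2, hxt, hxr, hxe⟩ := htodo x (by simp [h])
            exact ⟨hx1, hx2, F2 _ hxt, hxr, hxe⟩
          · obtain ⟨hv1, hv2⟩ := hjv pp hpp
            obtain ⟨hcv0, hcvm⟩ := pvEmod_bounds (pvVal pp y) m hmi
            refine ⟨hv1, hv2, F6 pp hpp, hreach_next pp hpp, ?_⟩
            -- the cell was still False, and inactive cells are always True: active
            right
            intro hpmc
            have := hpm ((pvVal pp y).emod m).toNat (by omega) hpmc
            rw [this] at hfalse
            simp at hfalse
        · -- closed
          intro i hi ht hexp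
          rcases F4 i ht with hold | ⟨-, k, hk, hkc⟩
          · rcases hcl i hi hold hexp with ⟨k, hk, hkc⟩ | hproc
            · rcases List.mem_append.1 hk with hk | hk
              · exact Or.inl ⟨k, F3 _ hk, hkc⟩
              · -- k = y : its whole row of successors has been processed
                simp only [List.mem_singleton] at hk
                subst hk
                right
                intro pp hpp
                have hiv : pvVal pp (i : Int) = pvVal pp k := by
                  rw [pvVal_eq_canon (hlen pp hpp) hm hy1 hy2, hkc]
                rw [hiv]
                exact F6 pp hpp
            · right
              intro pp hpp
              exact F2 _ (hproc pp hpp)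
          · exact Or.inl ⟨k, hk, hkc⟩
      have hmu := pvAStep_foldl_mu_le y p (cc0, ys)
      simp only at hmu
      have hmu' : 2 * (p.foldl (pvAStep y) (cc0, ys)).1.count false
          + (p.foldl (pvAStep y) (cc0, ys)).2.length ≤ N := by
        simp at hN
        omega
      rw [heq]
      exact ih _ _ hmu' hinv'

-- the initial visited list of A: p0 mapped through (== -1), position 0 set True
lemma pvInit_entry {p0 : List Int} {m : Nat} (hmp : p0.length = m) :
    ∀ i : Nat, i < m →
      (((p0.map (fun j => j == (-1 : Int))).set 0 true)[i]? = some true ↔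
        (i = 0 ∨ pvPm p0 i)) := by
  intro i hi
  have hib : i < (p0.map (fun j => j == (-1 : Int))).length := by simp [hmp]; omega
  have hip : i < p0.length := by omega
  rcases Nat.eq_zero_or_pos i with rfl | hipos
  · rw [List.getElem?_set]
    simp
    exact List.ne_nil_of_length_pos (by omega)
  · rw [List.getElem?_set, if_neg (by omega : ¬ (0 = i)), List.getElem?_eq_getElem hib]
    simp only [List.getElem_map]
    constructor
    · intro h
      right
      have : (p0[i] == (-1 : Int)) = true := by simpa using h
      have : p0[i] = -1 := by simpa using this
      show p0[i]? = some (-1)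
      rw [List.getElem?_eq_getElem hip, this]
    · intro h
      rcases h with h | h
      · omega
      · have : p0[i] = -1 := by
          have := h
          rw [pvPm, List.getElem?_eq_getElem hip] at this
          simpa using this
        simp [this]

lemma pvInit_pySetD {p0 : List Int} {m : Nat} (hmp : p0.length = m) (hm : 1 ≤ m) :
    PySem.List.pySetD (p0.map (fun j => j == (-1 : Int))) 0 true
      = (p0.map (fun j => j == (-1 : Int))).set 0 true := by
  have hidx : PySem.List.pyIdx? p0.length 0 = some 0 := by
    unfold PySem.List.pyIdx?
    rw [if_pos (by omega)]
    rw [if_pos (by exact_mod_cast (show 0 < p0.length by omega))]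
    rfl
  simp [PySem.List.pySetD, PySem.List.pySet?, hidx]

-- A's result, characterized as "every position is inactive or reachable from 0"
lemma pvA_char {p0 : List Int} {rest : List (List Int)} (n : Option Int)
    (hm : 1 ≤ p0.length)
    (hlen : ∀ q ∈ (p0 :: rest), q.length = p0.length)
    (hactv : ∀ x : Int, -(p0.length : Int) ≤ x → x < (p0.length : Int) →
        ∀ pp ∈ (p0 :: rest), -(p0.length : Int) ≤ pvVal pp x ∧ pvVal pp x < (p0.length : Int)) :
    (perms_are_transitive (p0 :: rest) n = true ↔
      ∀ i : Nat, i < p0.length →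
        (pvPm p0 i ∨ pvReachE p0 (p0 :: rest) p0.length (i : Int))) := by
  have hmi : (0 : Int) < (p0.length : Int) := by exact_mod_cast hm
  set base := p0.map (fun j => j == (-1 : Int)) with hbase
  have hbl : base.length = p0.length := by simp [hbase]
  have hinv : pvInv p0 (p0 :: rest) p0.length (base.set 0 true) [0] := by
    refine ⟨by simp [hbl], ?_, ?_, ?_, ?_, ?_⟩
    · exact (pvInit_entry rfl 0 hm).2 (Or.inl rfl)
    · intro i hi hp
      exact (pvInit_entry rfl i hi).2 (Or.inr hp)
    · intro i hi ht
      rcases (pvInit_entry rfl i hi).1 ht with h | h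
      · right
        subst h
        exact Relation.ReflTransGen.refl
      · exact Or.inl h
    · intro k hk
      simp only [List.mem_singleton] at hk
      subst hk
      have he : (0 : Int).emod p0.length = 0 := by
        rw [pvEmod_id _ _ (le_refl 0) hmi]
      rw [he]
      exact ⟨by omega, by omega, (pvInit_entry rfl 0 hm).2 (Or.inl rfl),
        Relation.ReflTransGen.refl, Or.inl rfl⟩
    · intro i hi ht hexp
      rcases (pvInit_entry rfl i hi).1 ht with h | h
      · subst h
        refine Or.inl ⟨0, by simp, ?_⟩
        rw [pvEmod_id _ _ (le_refl 0) hmi]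
        simp
      · rcases hexp with h0 | hnp
        · subst h0
          refine Or.inl ⟨0, by simp, ?_⟩
          rw [pvEmod_id _ _ (le_refl 0) hmi]
          simp
        · exact absurd h hnp
  obtain ⟨hrl, hriff⟩ := pvALoop_spec hm hlen hactv
    (2 * (base.set 0 true).count false + 1) (base.set 0 true) [0] (by simp) hinv
  have hres : perms_are_transitive (p0 :: rest) n
      = (pvALoop (p0 :: rest) (base.set 0 true) [0]).all id := by
    show (pvALoop (p0 :: rest) (PySem.List.pySetD base 0 true) [0]).all id = _
    rw [pvInit_pySetD rfl hm]
  rw [hres, List.all_eq_true]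
  constructor
  · intro hall i hi
    have hir : i < (pvALoop (p0 :: rest) (base.set 0 true) [0]).length := by omega
    have := hall _ (List.getElem_mem hir)
    exact (hriff i hi).1 (by rw [List.getElem?_eq_getElem hir]; simp_all)
  · intro hr x hx
    obtain ⟨i, hir, rfl⟩ := List.mem_iff_getElem.1 hx
    have hi : i < p0.length := by omega
    have := (hriff i hi).2 (hr i hi)
    rw [List.getElem?_eq_getElem hir] at this
    simpa using this

-- ---------- B side ----------

-- invariant of B's sweeps: the visited list holds exactly sound marks
def pvInvB (p0 : List Int) (p : List (List Int)) (m : Nat) (seen : List Bool) : Prop :=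
  seen.length = m ∧ seen[0]? = some true ∧
  (∀ i : Nat, i < m → pvPm p0 i → seen[i]? = some true) ∧
  (∀ i : Nat, i < m → seen[i]? = some true → pvPm p0 i ∨ pvReachE p0 p m (i : Int))

-- one pvB2Step: what it does to the visited list
lemma pvB2Step_spec {m : Nat} (hm : 0 < m) (j : Int) (pp : List Int) (st : List Bool × Bool)
    (hlen : st.1.length = m) (hk1 : -(m : Int) ≤ pvVal pp j) (hk2 : pvVal pp j < (m : Int)) :
    (pvB2Step j st pp).1.length = m ∧
    (∀ i : Nat, st.1[i]? = some true → (pvB2Step j st pp).1[i]? = some true) ∧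
    (∀ i : Nat, (pvB2Step j st pp).1[i]? = some true →
        st.1[i]? = some true ∨ (i : Int) = (pvVal pp j).emod m) ∧
    (pvB2Step j st pp).1[((pvVal pp j).emod m).toNat]? = some true := by
  obtain ⟨hc0, hcm⟩ := pvEmod_bounds (pvVal pp j) m (by exact_mod_cast hm)
  have hkn : ((pvVal pp j).emod m).toNat < st.1.length := by omega
  have hidx : PySem.List.pyIdx? st.1.length (pvVal pp j)
      = some ((pvVal pp j).emod m).toNat := by
    rw [hlen]
    exact pvIdx_canon m _ hk1 hk2
  have hget : PySem.List.pyGet? st.1 (pvVal pp j)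
      = some st.1[((pvVal pp j).emod m).toNat] := by
    show (PySem.List.pyIdx? st.1.length (pvVal pp j)).bind (fun i => st.1[i]?) = _
    rw [hidx]
    simp [List.getElem?_eq_getElem hkn]
  have hkk : pvB2Step j st pp
      = if PySem.List.pyGet? st.1 (pvVal pp j) = some false
        then (PySem.List.pySetD st.1 (pvVal pp j) true, true) else st := rfl
  by_cases hb : st.1[((pvVal pp j).emod m).toNat] = false
  · have hcond : PySem.List.pyGet? st.1 (pvVal pp j) = some false := by rw [hget, hb]
    have hset : PySem.List.pySetD st.1 (pvVal pp j) true
        = st.1.set ((pvVal pp j).emod m).toNat true := by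
      simp [PySem.List.pySetD, PySem.List.pySet?, hidx]
    rw [hkk, if_pos hcond, hset]
    refine ⟨by simp [hlen], ?_, ?_, ?_⟩
    · intro i hi
      rw [List.getElem?_set]
      split_ifs with h
      · simp
      · exact hi
    · intro i hi
      rw [List.getElem?_set] at hi
      split_ifs at hi with h
      · exact Or.inr (by rw [← h]; omega)
      · exact Or.inl hi
    · rw [List.getElem?_set]
      simp [hkn]
  · have hb' : st.1[((pvVal pp j).emod m).toNat] = true := by
      cases h : st.1[((pvVal pp j).emod m).toNat] <;> simp_all
    have hcond : ¬ (PySem.List.pyGet? st.1 (pvVal pp j) = some false) := by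
      rw [hget, hb']; simp
    rw [hkk, if_neg hcond]
    exact ⟨hlen, fun i hi => hi, fun i hi => Or.inl hi,
      by rw [List.getElem?_eq_getElem hkn, hb']⟩

-- the innermost 'for pp in p' loop, folded over any sublist l of p
lemma pvB2Step_foldl_spec {p : List (List Int)} {m : Nat} (hm : 1 ≤ m) {j : Int}
    (hjv : ∀ pp ∈ p, -(m : Int) ≤ pvVal pp j ∧ pvVal pp j < (m : Int)) :
    ∀ (l : List (List Int)), (∀ pp ∈ l, pp ∈ p) → ∀ (st : List Bool × Bool),
    st.1.length = m →
    (l.foldl (pvB2Step j) st).1.length = m ∧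
    (∀ i : Nat, st.1[i]? = some true → (l.foldl (pvB2Step j) st).1[i]? = some true) ∧
    (∀ i : Nat, (l.foldl (pvB2Step j) st).1[i]? = some true →
        st.1[i]? = some true ∨ ∃ pp ∈ l, (i : Int) = (pvVal pp j).emod m) ∧
    (∀ pp ∈ l, (l.foldl (pvB2Step j) st).1[((pvVal pp j).emod m).toNat]? = some true) := by
  intro l
  induction l with
  | nil =>
    intro _ st hlen
    exact ⟨hlen, fun i hi => hi, fun i hi => Or.inl hi, by simp⟩
  | cons pp l ih =>
    intro hl st hlen
    have hpp : pp ∈ p := hl pp (by simp)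
    obtain ⟨hk1, hk2⟩ := hjv pp hpp
    obtain ⟨S1, S2, S3, S4⟩ := pvB2Step_spec hm j pp st hlen hk1 hk2
    have hl' : ∀ q ∈ l, q ∈ p := fun q hq => hl q (by simp [hq])
    obtain ⟨F1, F2, F3, F4⟩ := ih hl' (pvB2Step j st pp) S1
    simp only [List.foldl_cons]
    refine ⟨F1, fun i hi => F2 i (S2 i hi), ?_, ?_⟩
    · intro i hi
      rcases F3 i hi with h | ⟨q, hq, hiq⟩
      · rcases S3 i h with h' | h'
        · exact Or.inl h'
        · exact Or.inr ⟨pp, by simp, h'⟩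
      · exact Or.inr ⟨q, by simp [hq], hiq⟩
    · intro q hq
      rcases List.mem_cons.1 hq with rfl | hq'
      · exact F2 _ S4
      · exact F4 q hq'

-- reading a Bool list at an in-range index
lemma pvGetBool {seen : List Bool} {m : Nat} (hlen : seen.length = m) {k : Int}
    (h1 : -(m : Int) ≤ k) (h2 : k < (m : Int)) :
    PySem.List.pyGet? seen k = seen[(k.emod m).toNat]? := by
  show (PySem.List.pyIdx? seen.length k).bind (fun i => seen[i]?) = _
  rw [hlen, pvIdx_canon m k h1 h2]
  rfl

-- the guard of pvB2J holds exactly at marked active positions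
lemma pvB2Guard {p0 : List Int} {m : Nat} {seen : List Bool}
    (hL : seen.length = m) (hp0 : p0.length = m) {j : Nat} (hj : j < m) :
    ((PySem.List.pyGet? seen (j : Int) = some true ∧
        (PySem.List.pyGet? p0 (j : Int)).getD 0 ≠ -1)
      ↔ (seen[j]? = some true ∧ ¬ pvPm p0 j)) := by
  have hj0 : (0 : Int) ≤ (j : Int) := by omega
  have hjm : (j : Int) < (m : Int) := by exact_mod_cast hj
  have hje : ((j : Int).emod m).toNat = j := by
    rw [pvEmod_id _ _ hj0 hjm]
    omega
  have hgs : PySem.List.pyGet? seen (j : Int) = seen[j]? := by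
    rw [pvGetBool hL (by omega) hjm, hje]
  have hjp : j < p0.length := by omega
  have hgp : PySem.List.pyGet? p0 (j : Int) = some p0[j] := by
    rw [pvGet_canon hp0 (by omega) hjm, hje]
    exact List.getElem?_eq_getElem hjp
  rw [hgs, hgp]
  simp only [Option.getD_some]
  constructor
  · rintro ⟨h1, h2⟩
    refine ⟨h1, ?_⟩
    intro hpm
    rw [pvPm, List.getElem?_eq_getElem hjp] at hpm
    exact h2 (by simpa using hpm)
  · rintro ⟨h1, h2⟩
    refine ⟨h1, ?_⟩
    intro he
    exact h2 (by rw [pvPm, List.getElem?_eq_getElem hjp, he])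

-- one sweep preserves the invariant
lemma pvB2Sweep_inv {p0 : List Int} {p : List (List Int)} {m : Nat} (hm : 1 ≤ m)
    (hp0 : p0.length = m)
    (hactv : ∀ x : Int, -(m : Int) ≤ x → x < (m : Int) →
        ∀ pp ∈ p, -(m : Int) ≤ pvVal pp x ∧ pvVal pp x < (m : Int)) :
    ∀ (l : List Int), (∀ j ∈ l, 0 ≤ j ∧ j < (m : Int)) →
    ∀ (st : List Bool × Bool), pvInvB p0 p m st.1 →
    pvInvB p0 p m ((l.foldl (pvB2J p0 p) st).1) := by
  intro l
  induction l with
  | nil => intro _ st h; exact h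
  | cons j l ihl =>
    intro hl st hinv
    simp only [List.foldl_cons]
    refine ihl (fun x hx => hl x (by simp [hx])) _ ?_
    obtain ⟨hj0, hjm⟩ := hl j (by simp)
    obtain ⟨hL, h0, hpmt, hsound⟩ := hinv
    show pvInvB p0 p m ((pvB2J p0 p st j).1)
    unfold pvB2J
    split_ifs with hg
    · -- the guard holds: position j is marked and active, hence reachable
      have hje : ((j.emod m).toNat : Int) = j := by
        rw [pvEmod_id _ _ hj0 hjm]
        omega
      have hjn : (j.emod m).toNat < m := by
        obtain ⟨a, b⟩ := pvEmod_bounds j m (by exact_mod_cast hm)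
        omega
      have hg2 : PySem.List.pyGet? st.1 (((j.emod m).toNat : Int)) = some true ∧
          (PySem.List.pyGet? p0 (((j.emod m).toNat : Int))).getD 0 ≠ -1 := by
        rw [hje]; exact hg
      obtain ⟨hjt, hnpm⟩ := (pvB2Guard hL hp0 hjn).1 hg2
      have hjreach : pvReachE p0 p m j := by
        rcases hsound (j.emod m).toNat hjn hjt with h | h
        · exact absurd h hnpm
        · rwa [hje] at h
      have hjv := fun pp hpp => hactv j (by omega) hjm pp hpp
      obtain ⟨F1, F2, F3, F4⟩ :=
        pvB2Step_foldl_spec hm hjv p (fun q hq => hq) st hL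
      have hexp : j = 0 ∨ ¬ pvPm p0 j.toNat := by
        right
        have hteq : (j.emod m).toNat = j.toNat := by
          rw [pvEmod_id _ _ hj0 hjm]
        rwa [hteq] at hnpm
      refine ⟨F1, F2 0 h0, fun i hi hp => F2 i (hpmt i hi hp), ?_⟩
      intro i hi ht
      rcases F3 i ht with h | ⟨pp, hpp, hiq⟩
      · exact hsound i hi h
      · right
        rw [hiq]
        exact Relation.ReflTransGen.tail hjreach ⟨hexp, pp, hpp, rfl⟩
    · exact ⟨hL, h0, hpmt, hsound⟩

-- a sweep that reports no change did nothing, and every guarded image was already marked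
lemma pvB2Foldl_true {α : Type} (step : List Bool × Bool → α → List Bool × Bool)
    (hmono : ∀ st a, st.2 = true → (step st a).2 = true) :
    ∀ (l : List α) (st : List Bool × Bool), st.2 = true → (l.foldl step st).2 = true := by
  intro l
  induction l with
  | nil => exact fun st h => h
  | cons a l ih => exact fun st h => ih (step st a) (hmono st a h)

lemma pvB2Foldl_false {α : Type} (step : List Bool × Bool → α → List Bool × Bool)
    (hmono : ∀ st a, st.2 = true → (step st a).2 = true)
    (hfalse : ∀ st a, (step st a).2 = false → step st a = st) :
    ∀ (l : List α) (st : List Bool × Bool), (l.foldl step st).2 = false →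
      l.foldl step st = st ∧ ∀ a ∈ l, (step st a).2 = false := by
  intro l
  induction l with
  | nil => exact fun st _ => ⟨rfl, by simp⟩
  | cons a l ih =>
    intro st hf
    simp only [List.foldl_cons] at hf ⊢
    have ha : (step st a).2 = false := by
      cases h : (step st a).2
      · rfl
      · rw [pvB2Foldl_true step hmono l (step st a) h] at hf
        exact hf
    rw [hfalse st a ha] at hf ⊢
    obtain ⟨h1, h2⟩ := ih st hf
    refine ⟨h1, ?_⟩
    intro x hx
    rcases List.mem_cons.1 hx with rfl | hx'
    · exact ha
    · exact h2 x hx'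

lemma pvB2Step_mono2 (j : Int) (st : List Bool × Bool) (pp : List Int) :
    st.2 = true → (pvB2Step j st pp).2 = true := by
  intro h
  unfold pvB2Step
  dsimp only
  split_ifs with hc
  · rfl
  · exact h

lemma pvB2Step_false (j : Int) (st : List Bool × Bool) (pp : List Int) :
    (pvB2Step j st pp).2 = false →
      pvB2Step j st pp = st ∧
      ¬ (PySem.List.pyGet? st.1 ((PySem.List.pyGet? pp j).getD 0) = some false) := by
  intro h
  unfold pvB2Step at h ⊢
  dsimp only at h ⊢
  split_ifs at h ⊢ with hc
  exact ⟨rfl, hc⟩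

lemma pvB2J_mono2 (p0 : List Int) (p : List (List Int)) (st : List Bool × Bool) (j : Int) :
    st.2 = true → (pvB2J p0 p st j).2 = true := by
  intro h
  unfold pvB2J
  split_ifs with hg
  · exact pvB2Foldl_true _ (fun st pp => pvB2Step_mono2 j st pp) p st h
  · exact h

lemma pvB2J_false (p0 : List Int) (p : List (List Int)) (st : List Bool × Bool) (j : Int) :
    (pvB2J p0 p st j).2 = false →
      pvB2J p0 p st j = st ∧
      ((PySem.List.pyGet? st.1 j = some true ∧ (PySem.List.pyGet? p0 j).getD 0 ≠ -1) →
        ∀ pp ∈ p,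
          ¬ (PySem.List.pyGet? st.1 ((PySem.List.pyGet? pp j).getD 0) = some false)) := by
  intro h
  unfold pvB2J at h ⊢
  split_ifs at h ⊢ with hg
  · obtain ⟨h1, h2⟩ := pvB2Foldl_false _ (fun st pp => pvB2Step_mono2 j st pp)
      (fun st pp h => (pvB2Step_false j st pp h).1) p st h
    refine ⟨h1, fun _ pp hpp => ?_⟩
    exact (pvB2Step_false j st pp (h2 pp hpp)).2
  · exact ⟨rfl, fun hg' => absurd hg' hg⟩

-- a sweep with no change: the marks are closed, hence complete
lemma pvB2Fix {p0 : List Int} {p : List (List Int)} {m : Nat} (hm : 1 ≤ m)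
    (h00 : ¬ pvPm p0 0) (hp0 : p0.length = m)
    (hactv : ∀ x : Int, -(m : Int) ≤ x → x < (m : Int) →
        ∀ pp ∈ p, -(m : Int) ≤ pvVal pp x ∧ pvVal pp x < (m : Int)) :
    ∀ (seen : List Bool), pvInvB p0 p m seen →
    ((PySem.List.pyRange 0 (m : Int) 1).foldl (pvB2J p0 p) (seen, false)).2 = false →
    (((PySem.List.pyRange 0 (m : Int) 1).foldl (pvB2J p0 p) (seen, false)).1.length = m ∧
      ∀ i : Nat, i < m →
        ((((PySem.List.pyRange 0 (m : Int) 1).foldl (pvB2J p0 p) (seen, false)).1)[i]? = some true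
          ↔ (pvPm p0 i ∨ pvReachE p0 p m (i : Int)))) := by
  intro seen hinv hch
  obtain ⟨hL, h0, hpmt, hsound⟩ := hinv
  obtain ⟨heq, hall⟩ := pvB2Foldl_false (pvB2J p0 p) (pvB2J_mono2 p0 p) (fun st j h => (pvB2J_false p0 p st j h).1)
    (PySem.List.pyRange 0 (m : Int) 1) (seen, false) hch
  rw [heq]
  have hcl : ∀ i : Nat, i < m → seen[i]? = some true → (i = 0 ∨ ¬ pvPm p0 i) →
      ∀ pp ∈ p, seen[((pvVal pp (i : Int)).emod m).toNat]? = some true := by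
    intro i hi ht hexp pp hpp
    have hnpm : ¬ pvPm p0 i := by
      rcases hexp with rfl | h
      · exact h00
      · exact h
    have hmem : (i : Int) ∈ PySem.List.pyRange 0 (m : Int) 1 := by
      rw [PySem.List.mem_pyRange_one]
      constructor
      · omega
      · exact_mod_cast hi
    have hji := (pvB2J_false p0 p (seen, false) (i : Int) (hall _ hmem)).2
    have hguard := (pvB2Guard hL hp0 hi).2 ⟨ht, hnpm⟩
    have hnot := hji hguard pp hpp
    obtain ⟨hv1, hv2⟩ := hactv (i : Int) (by omega) (by exact_mod_cast hi) pp hpp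
    obtain ⟨hc0, hcm⟩ := pvEmod_bounds (pvVal pp (i : Int)) m (by exact_mod_cast hm)
    have hcn : ((pvVal pp (i : Int)).emod m).toNat < seen.length := by omega
    have hgv : PySem.List.pyGet? seen (pvVal pp (i : Int))
        = some seen[((pvVal pp (i : Int)).emod m).toNat] := by
      rw [pvGetBool hL hv1 hv2]
      exact List.getElem?_eq_getElem hcn
    have hval : PySem.List.pyGet? seen ((PySem.List.pyGet? pp (i : Int)).getD 0)
        = some seen[((pvVal pp (i : Int)).emod m).toNat] := hgv
    rw [hval] at hnot
    have : seen[((pvVal pp (i : Int)).emod m).toNat] = true := by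
      cases h : seen[((pvVal pp (i : Int)).emod m).toNat]
      · exact absurd (by rw [h]) hnot
      · rfl
    rw [List.getElem?_eq_getElem hcn, this]
  refine ⟨hL, fun i hi => ⟨fun ht => hsound i hi ht, fun hr => ?_⟩⟩
  rcases hr with hr | hr
  · exact hpmt i hi hr
  · have := pvComplete hm h0 hcl (i : Int) hr
    simpa using this

-- B's 'while changed:' loop, characterized
lemma pvB2Loop_spec {p0 : List Int} {p : List (List Int)} {m : Nat} (hm : 1 ≤ m)
    (h00 : ¬ pvPm p0 0) (hp0 : p0.length = m)
    (hactv : ∀ x : Int, -(m : Int) ≤ x → x < (m : Int) →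
        ∀ pp ∈ p, -(m : Int) ≤ pvVal pp x ∧ pvVal pp x < (m : Int)) :
    ∀ (N : Nat) (seen : List Bool), seen.count false ≤ N → pvInvB p0 p m seen →
    (pvB2Loop p0 p (m : Int) seen).length = m ∧
    ∀ i : Nat, i < m →
      ((pvB2Loop p0 p (m : Int) seen)[i]? = some true ↔
        (pvPm p0 i ∨ pvReachE p0 p m (i : Int))) := by
  have hrange : ∀ j ∈ PySem.List.pyRange 0 (m : Int) 1, 0 ≤ j ∧ j < (m : Int) := by
    intro j hj
    rw [PySem.List.mem_pyRange_one] at hj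
    exact hj
  intro N
  induction N with
  | zero =>
    intro seen hN hinv
    rw [pvB2Loop]
    have hct := pvB2Foldl_count (pvB2J p0 p) (pvB2J_count p0 p)
      (PySem.List.pyRange 0 (m : Int) 1) (seen, false)
    have hch : ((PySem.List.pyRange 0 (m : Int) 1).foldl (pvB2J p0 p) (seen, false)).2 = false := by
      cases h : ((PySem.List.pyRange 0 (m : Int) 1).foldl (pvB2J p0 p) (seen, false)).2
      · rfl
      · rcases hct.2 h with h' | h'
        · simp at h'
        · exfalso
          simp only at h'
          omega
    rw [if_neg (by simp [hch])]
    exact pvB2Fix hm h00 hp0 hactv seen hinv hch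
  | succ N ih =>
    intro seen hN hinv
    rw [pvB2Loop]
    by_cases hch : ((PySem.List.pyRange 0 (m : Int) 1).foldl (pvB2J p0 p) (seen, false)).2 = true
    · rw [if_pos hch]
      have hct := pvB2Foldl_count (pvB2J p0 p) (pvB2J_count p0 p)
        (PySem.List.pyRange 0 (m : Int) 1) (seen, false)
      have hlt : ((PySem.List.pyRange 0 (m : Int) 1).foldl
          (pvB2J p0 p) (seen, false)).1.count false < seen.count false := by
        rcases hct.2 hch with h | h
        · simp at h
        · simpa using h
      have hinv' := pvB2Sweep_inv hm hp0 hactv _ hrange (seen, false) hinv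
      exact ih _ (by omega) hinv'
    · rw [if_neg hch]
      have hch' : ((PySem.List.pyRange 0 (m : Int) 1).foldl
          (pvB2J p0 p) (seen, false)).2 = false := by
        cases h : ((PySem.List.pyRange 0 (m : Int) 1).foldl (pvB2J p0 p) (seen, false)).2
        · rfl
        · exact absurd h hch
      exact pvB2Fix hm h00 hp0 hactv seen hinv hch'

-- B's result, characterized the same way
lemma pvB_char {p0 : List Int} {rest : List (List Int)} (n : Option Int)
    (hm : 1 ≤ p0.length) (h00 : ¬ pvPm p0 0)
    (hactv : ∀ x : Int, -(p0.length : Int) ≤ x → x < (p0.length : Int) →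
        ∀ pp ∈ (p0 :: rest), -(p0.length : Int) ≤ pvVal pp x ∧ pvVal pp x < (p0.length : Int)) :
    (perms_are_transitive_alt (p0 :: rest) n = true ↔
      ∀ i : Nat, i < p0.length →
        (pvPm p0 i ∨ pvReachE p0 (p0 :: rest) p0.length (i : Int))) := by
  set base := p0.map (fun v => v == (-1 : Int)) with hbase
  have hbl : base.length = p0.length := by simp [hbase]
  have hinv : pvInvB p0 (p0 :: rest) p0.length (base.set 0 true) := by
    refine ⟨by simp [hbl], (pvInit_entry rfl 0 hm).2 (Or.inl rfl), ?_, ?_⟩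
    · intro i hi hp
      exact (pvInit_entry rfl i hi).2 (Or.inr hp)
    · intro i hi ht
      rcases (pvInit_entry rfl i hi).1 ht with h | h
      · right
        subst h
        exact Relation.ReflTransGen.refl
      · exact Or.inl h
  obtain ⟨hrl, hriff⟩ := pvB2Loop_spec hm h00 rfl hactv
    ((base.set 0 true).count false) (base.set 0 true) (le_refl _) hinv
  have hres : perms_are_transitive_alt (p0 :: rest) n
      = (pvB2Loop p0 (p0 :: rest) (p0.length : Int) (base.set 0 true)).all id := by
    show (pvB2Loop p0 (p0 :: rest) (p0.length : Int) (PySem.List.pySetD base 0 true)).all id = _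
    rw [pvInit_pySetD rfl hm]
  rw [hres, List.all_eq_true]
  constructor
  · intro hall i hi
    have hir : i < (pvB2Loop p0 (p0 :: rest) (p0.length : Int) (base.set 0 true)).length := by omega
    have := hall _ (List.getElem_mem hir)
    exact (hriff i hi).1 (by rw [List.getElem?_eq_getElem hir]; simp_all)
  · intro hr x hx
    obtain ⟨i, hir, rfl⟩ := List.mem_iff_getElem.1 hx
    have hi : i < p0.length := by omega
    have := (hriff i hi).2 (hr i hi)
    rw [List.getElem?_eq_getElem hir] at this
    simpa using this

-- under Pre_, any in-range index of any row reads an in-range value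
lemma pvValWf_spec {p0 : List Int} {rest : List (List Int)} (hm : 1 ≤ p0.length)
    (hrow : ∀ q ∈ (p0 :: rest), q.length = p0.length ∧
      ∀ e ∈ q, -(p0.length : Int) ≤ e ∧ e < (p0.length : Int)) :
    ∀ x : Int, -(p0.length : Int) ≤ x → x < (p0.length : Int) →
        ∀ pp ∈ (p0 :: rest), -(p0.length : Int) ≤ pvVal pp x ∧ pvVal pp x < (p0.length : Int) := by
  intro x hx1 hx2 pp hpp
  set m := p0.length with hmdef
  have hmi : (0 : Int) < (m : Int) := by exact_mod_cast hm
  obtain ⟨hc0, hcm⟩ := pvEmod_bounds x m hmi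
  obtain ⟨hlen, hbound⟩ := hrow pp hpp
  have hcn : (x.emod m).toNat < pp.length := by omega
  have hget : PySem.List.pyGet? pp x = some pp[(x.emod m).toNat] := by
    rw [pvGet_canon hlen hx1 hx2]
    exact List.getElem?_eq_getElem hcn
  have hval : pvVal pp x = pp[(x.emod m).toNat] := by simp [pvVal, hget]
  rw [hval]
  exact hbound _ (List.getElem_mem hcn)

-- ===== VERDICT (by name: the statement is the Claim_ definition above) =====
theorem perms_are_transitive_spec : Claim_equal_perms_are_transitive := by
  intro p n hdom hpre
  obtain ⟨hne, hm, h00, hrow⟩ := hpre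
  cases p with
  | nil => exact absurd rfl hne
  | cons p0 rest =>
    have hhead : ((p0 :: rest).headD []) = p0 := rfl
    rw [hhead] at hm h00 hrow
    have h00' : ¬ pvPm p0 0 := h00
    have hactv := pvValWf_spec hm hrow
    unfold Spec_perms_are_transitive
    rw [Bool.eq_iff_iff,
      pvA_char n hm (fun q hq => (hrow q hq).1) hactv,
      pvB_char n hm h00' hactv]
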